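-- pv_equiv track=rewrite | github.com/ngdhuy/SE_01_Python | Lab02/Module/Module07.py | find_second_last_odd_number
-- ===== SOURCE A (Python) =====
-- def find_second_last_odd_number(arr):
--     flag_first_last_odd = False
--     index = len(arr) - 1
--     while index >= 0:
--         if arr[index] % 2 != 0:
--             if not flag_first_last_odd:
--                 flag_first_last_odd = True
--             else:
--                 return index
--         index -= 1
--     else:
--         return -1
-- ===== SOURCE B (Python) =====
-- def find_second_last_odd_number(arr):
--     idx = [i for i, x in enumerate(arr) if x % 2 != 0]
--     return idx[-2] if len(idx) >= 2 else -1
-- ===== Notes on version B (the rewrite author's own statement) =====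
-- stated objective: simpler
-- what changed: Replaces the backward while-loop with a flag and early return by a single forward comprehension collecting all odd indices, then selecting the second-to-last of them by negative indexing.
import Mathlib
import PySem

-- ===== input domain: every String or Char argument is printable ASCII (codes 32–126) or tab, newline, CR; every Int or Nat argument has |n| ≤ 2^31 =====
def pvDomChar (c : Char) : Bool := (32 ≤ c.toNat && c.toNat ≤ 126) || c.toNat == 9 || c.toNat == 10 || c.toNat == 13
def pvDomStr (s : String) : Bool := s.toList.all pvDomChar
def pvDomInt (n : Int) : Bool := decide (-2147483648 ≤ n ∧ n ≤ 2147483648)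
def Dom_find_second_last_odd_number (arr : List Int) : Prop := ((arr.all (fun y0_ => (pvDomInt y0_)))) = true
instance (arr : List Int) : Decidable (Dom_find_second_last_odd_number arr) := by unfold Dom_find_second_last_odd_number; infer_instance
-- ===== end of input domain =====

-- B replaces A's backward flag-scan by one forward pass collecting all odd indices and picking the second-to-last (simpler decomposition, same cost).

-- ===== PORT A =====
-- while loop from index = len(arr)-1 down to 0, carrying the flag; recursion on index+1
def pvLoopA (arr : List Int) (flag : Bool) : Nat → Int
  | 0 => -1
  | n + 1 =>
    if PySem.Int.mod (arr.getD n 0) 2 ≠ 0 then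
      if !flag then pvLoopA arr true n
      else (n : Int)
    else pvLoopA arr flag n

def find_second_last_odd_number (arr : List Int) : Int :=
  pvLoopA arr false arr.length

-- ===== PORT B =====
def find_second_last_odd_number_alt (arr : List Int) : Int :=
  let idx := ((PySem.List.enumerate arr).filter (fun p => PySem.Int.mod p.2 2 != 0)).map (·.1)
  if 2 ≤ idx.length then PySem.List.pyGetD idx (-2) (-1) else -1

-- ===== PRECONDITION & SPEC =====
def Spec_find_second_last_odd_number (arr : List Int) (out : Int) : Prop := out = find_second_last_odd_number_alt arr
instance (arr : List Int) (out : Int) : Decidable (Spec_find_second_last_odd_number arr out) := by unfold Spec_find_second_last_odd_number; infer_instance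

-- ===== CLAIM (what is proved, stated in full; the proofs are below) =====
def Claim_equal_find_second_last_odd_number : Prop := ∀ (arr : List Int), Dom_find_second_last_odd_number arr → Spec_find_second_last_odd_number arr (find_second_last_odd_number arr)

-- ===== LEMMAS AND PROOFS =====

def pvOdds (arr : List Int) (n : Nat) : List Nat :=
  (List.range n).filter (fun i => PySem.Int.mod (arr.getD i 0) 2 != 0)

theorem pvOdds_succ (arr : List Int) (n : Nat) :
    pvOdds arr (n + 1) =
      pvOdds arr n ++ (if PySem.Int.mod (arr.getD n 0) 2 ≠ 0 then [n] else []) := by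
  simp [pvOdds, List.range_succ, List.filter_append]
  split_ifs <;> simp_all

theorem pvLoopA_eq (arr : List Int) (n : Nat) :
    (pvLoopA arr true n = match (pvOdds arr n).reverse with
      | a :: _ => (a : Int)
      | [] => -1) ∧
    (pvLoopA arr false n = match (pvOdds arr n).reverse with
      | _ :: b :: _ => (b : Int)
      | _ => -1) := by
  induction n with
  | zero => simp [pvLoopA, pvOdds]
  | succ n ih =>
    obtain ⟨ih1, ih2⟩ := ih
    rw [pvOdds_succ]
    by_cases h : PySem.Int.mod (arr.getD n 0) 2 ≠ 0
    · rw [if_pos h]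
      simp only [pvLoopA, if_pos h, Bool.not_true, Bool.not_false, if_true,
        List.reverse_append, List.reverse_cons, List.reverse_nil, List.nil_append,
        List.singleton_append]
      rw [ih1]
      rcases (pvOdds arr n).reverse with _ | ⟨a, t⟩ <;> simp
    · rw [if_neg h]
      simp only [pvLoopA, if_neg h, List.append_nil]
      exact ⟨ih1, ih2⟩

theorem pvIdx_eq (arr : List Int) :
    ((PySem.List.enumerate arr).filter (fun p => PySem.Int.mod p.2 2 != 0)).map (·.1)
      = (pvOdds arr arr.length).map (Nat.cast) := by
  rw [PySem.List.enumerate_eq_map_pyRange arr 0, PySem.List.len_eq,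
    PySem.List.pyRange_zero_nat, List.map_map, List.filter_map, List.map_map,
    pvOdds]
  have e1 : ∀ i ∈ List.range arr.length,
      (((fun p => PySem.Int.mod p.2 2 != 0) ∘ (fun j => (j, PySem.List.pyGetD arr j 0)) ∘
        fun k : Nat => ((k : Int))) i)
        = ((fun i => PySem.Int.mod (arr.getD i 0) 2 != 0) i) := by
    intro i _
    simp [Function.comp, PySem.List.pyGetD_natCast]
  rw [List.filter_congr e1]
  apply List.map_congr_left
  intro i _
  simp [Function.comp]


-- ===== VERDICT (by name: the statement is the Claim_ definition above) =====
theorem find_second_last_odd_number_spec : Claim_equal_find_second_last_odd_number := by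
  intro arr _
  unfold Spec_find_second_last_odd_number find_second_last_odd_number find_second_last_odd_number_alt
  rw [(pvLoopA_eq arr arr.length).2]
  rw [pvIdx_eq]
  set L := pvOdds arr arr.length with hL
  rcases hr : L.reverse with _ | ⟨a, _ | ⟨b, t⟩⟩
  · have : L = [] := by simpa using congrArg List.reverse hr
    simp [this]
  · have : L = [a] := by simpa using congrArg List.reverse hr
    simp [this]
  · have hlen : 2 ≤ L.length := by
      have := congrArg List.length hr
      simp at this; omega
    have hlen2 : 2 ≤ (L.map (Nat.cast (R := Int))).length := by simpa using hlen
    rw [if_pos hlen2,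
        PySem.List.pyGetD_neg_ofNat _ 2 _ (by omega) (by omega)]
    have hb : L.reverse[1]'(by simp; omega) = b := by simp [hr]
    rw [List.getElem_reverse] at hb
    simp only [List.length_map]
    rw [List.getElem_map]
    simp only [show L.length - 2 = L.length - 1 - 1 from by omega, hb]
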